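-- pv_equiv track=rewrite | github.com/EceSenaEtoglu/news-recommendation-system | src/utils/helpers.py | extract_title_from_evidence
-- ===== SOURCE A (Python) =====
-- from typing import Dict, List, Optional, Any
--
-- def extract_title_from_evidence(evidence_fetch_outcomes: List[Dict]) -> Optional[str]:
--     """Extract the best title from evidence texts."""
--     titles = []
--     for e in evidence_fetch_outcomes:
--         title = e.get("extracted_title", "").strip()
--         if title and len(title) >= 10:  # reasonable minimum
--             titles.append(title)
--
--     if not titles:
--         return None
--
--     # Return the longest title (often most descriptive)
--     return max(titles, key=len)
-- ===== SOURCE B (Python) =====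
-- def extract_title_from_evidence(evidence_fetch_outcomes):
--     """Extract the best title from evidence texts.
--
--     Two-phase approach: first compute only the maximum LENGTH among the
--     valid titles (an integer), then scan again and return the first valid
--     title having that length (which is exactly max's first-wins winner).
--     """
--     def valid_title(e):
--         t = e.get("extracted_title", "").strip()
--         return t if t and len(t) >= 10 else None
--
--     m = 0
--     for e in evidence_fetch_outcomes:
--         t = valid_title(e)
--         if t is not None and len(t) > m:
--             m = len(t)
--     if m == 0:
--         return None
--     for e in evidence_fetch_outcomes:
--         t = valid_title(e)
--         if t is not None and len(t) == m:
--             return t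
-- ===== Notes on version B (the rewrite author's own statement) =====
-- stated objective: alternative
-- what changed: Instead of collecting the valid titles into a list and taking max(key=len) over strings, B never builds a list of titles: a first pass computes only the maximum length (an integer, 0 meaning none qualified), and a second pass returns the first valid title of exactly that length, which coincides with max's first-wins tie rule.
import Mathlib
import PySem

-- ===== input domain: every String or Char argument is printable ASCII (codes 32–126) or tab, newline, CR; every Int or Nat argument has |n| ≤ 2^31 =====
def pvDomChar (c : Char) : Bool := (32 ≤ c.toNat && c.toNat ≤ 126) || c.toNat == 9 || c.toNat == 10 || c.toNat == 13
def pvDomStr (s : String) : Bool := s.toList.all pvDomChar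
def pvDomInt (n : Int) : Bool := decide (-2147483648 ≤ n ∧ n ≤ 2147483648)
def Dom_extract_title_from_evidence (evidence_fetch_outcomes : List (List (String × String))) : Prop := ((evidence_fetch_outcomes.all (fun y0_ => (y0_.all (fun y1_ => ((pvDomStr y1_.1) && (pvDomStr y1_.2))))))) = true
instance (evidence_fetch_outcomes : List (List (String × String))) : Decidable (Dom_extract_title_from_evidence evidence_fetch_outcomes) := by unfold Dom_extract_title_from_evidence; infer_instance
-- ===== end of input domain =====

-- B re-derives max(titles, key=len) by a different decomposition: it never builds the titles list — one pass computes only the maximum length (0 = nothing valid), a second pass returns the first valid title of that length (objective: alternative).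


-- ===== PORT A =====
-- A: first pass builds the list of valid titles, then returns max(titles, key=len) (None if empty).
def extract_title_from_evidence (evidence_fetch_outcomes : List (List (String × String))) : Option String :=
  let titles : List String := evidence_fetch_outcomes.foldl
    (fun acc e =>
      let title := PySem.Str.strip (PySem.Dict.getD ⟨e⟩ "extracted_title" "")
      if title ≠ "" ∧ 10 ≤ PySem.Str.len title then acc ++ [title] else acc) []
  if titles = [] then none
  else PySem.List.max? titles PySem.Str.len

-- ===== PORT B =====
-- B's helper valid_title(e): the stripped extracted_title if non-empty and of length ≥ 10, else None.
def pvValid (e : List (String × String)) : Option String :=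
  let t := PySem.Str.strip (PySem.Dict.getD ⟨e⟩ "extracted_title" "")
  if t ≠ "" ∧ 10 ≤ PySem.Str.len t then some t else none

-- B's second loop: return the first valid title whose length equals m.
def pvFindLen (l : List (List (String × String))) (m : Int) : Option String :=
  match l with
  | [] => none
  | e :: rest =>
    match pvValid e with
    | some t => if PySem.Str.len t = m then some t else pvFindLen rest m
    | none => pvFindLen rest m

-- B: compute the maximum length m of a valid title (0 if none), then return the first valid title of length m.
def extract_title_from_evidence_alt (evidence_fetch_outcomes : List (List (String × String))) : Option String :=
  let m : Int := evidence_fetch_outcomes.foldl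
    (fun m e =>
      match pvValid e with
      | some t => if m < PySem.Str.len t then PySem.Str.len t else m
      | none => m) 0
  if m = 0 then none else pvFindLen evidence_fetch_outcomes m

-- ===== PRECONDITION & SPEC =====
def Spec_extract_title_from_evidence (evidence_fetch_outcomes : List (List (String × String))) (out : Option String) : Prop := out = extract_title_from_evidence_alt evidence_fetch_outcomes
instance (evidence_fetch_outcomes : List (List (String × String))) (out : Option String) : Decidable (Spec_extract_title_from_evidence evidence_fetch_outcomes out) := by unfold Spec_extract_title_from_evidence; infer_instance

-- ===== CLAIM (what is proved, stated in full; the proofs are below) =====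
def Claim_equal_extract_title_from_evidence : Prop := ∀ (evidence_fetch_outcomes : List (List (String × String))), Dom_extract_title_from_evidence evidence_fetch_outcomes → Spec_extract_title_from_evidence evidence_fetch_outcomes (extract_title_from_evidence evidence_fetch_outcomes)

-- ===== LEMMAS AND PROOFS =====

-- running-max step of B's first loop, as a named function
def pvStep (m : Int) (t : String) : Int :=
  if m < PySem.Str.len t then PySem.Str.len t else m

-- maximum length of a list of strings (0 for [])
def pvMaxLen (ts : List String) : Int := ts.foldl pvStep 0

-- the running-best step hiding inside PySem.List.max?
def pvUpd : Option String → String → Option String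
  | none, x => some x
  | some m, x => if PySem.Str.len m < PySem.Str.len x then some x else some m

theorem pv_len_nonneg (s : String) : 0 ≤ PySem.Str.len s := by
  rw [PySem.Str.len_eq]; exact Int.natCast_nonneg _

theorem pvStep_eq (a : Int) (t : String) : pvStep a t = max a (PySem.Str.len t) := by
  unfold pvStep
  split_ifs with h
  · exact (max_eq_right h.le).symm
  · exact (max_eq_left (not_lt.mp h)).symm

theorem pv_foldl_step_init : ∀ (ts : List String) (a : Int), 0 ≤ a →
    ts.foldl pvStep a = max a (pvMaxLen ts) := by
  intro ts
  induction ts with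
  | nil => intro a ha; simp [pvMaxLen, max_eq_left ha]
  | cons t r ih =>
    intro a ha
    have hstep : 0 ≤ pvStep a t := by rw [pvStep_eq]; exact le_trans ha (le_max_left _ _)
    have h0 : pvStep 0 t = PySem.Str.len t := by
      rw [pvStep_eq, max_eq_right (pv_len_nonneg t)]
    simp only [pvMaxLen, List.foldl_cons]
    rw [ih (pvStep a t) hstep, ih (pvStep 0 t) (h0 ▸ pv_len_nonneg t)]
    rw [pvStep_eq, h0]
    show max (max a (PySem.Str.len t)) (pvMaxLen r) = max a (max (PySem.Str.len t) (pvMaxLen r))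
    rw [max_assoc]

theorem pvMaxLen_cons (t : String) (r : List String) :
    pvMaxLen (t :: r) = max (PySem.Str.len t) (pvMaxLen r) := by
  have h0 : pvStep 0 t = PySem.Str.len t := by
    rw [pvStep_eq, max_eq_right (pv_len_nonneg t)]
  simp only [pvMaxLen, List.foldl_cons]
  rw [pv_foldl_step_init r (pvStep 0 t) (h0 ▸ pv_len_nonneg t), h0]
  rfl

theorem pvMaxLen_nonneg (ts : List String) : 0 ≤ pvMaxLen ts := by
  induction ts with
  | nil => simp [pvMaxLen]
  | cons t r ih => rw [pvMaxLen_cons]; exact le_trans ih (le_max_right _ _)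

theorem pv_le_maxLen {t : String} {ts : List String} (h : t ∈ ts) :
    PySem.Str.len t ≤ pvMaxLen ts := by
  induction ts with
  | nil => cases h
  | cons x r ih =>
    rw [pvMaxLen_cons]
    rcases List.mem_cons.mp h with rfl | hm
    · exact le_max_left _ _
    · exact le_trans (ih hm) (le_max_right _ _)

-- if nothing in rest beats b, the running best stays b
theorem pv_G1 : ∀ (rest : List String) (b : String),
    (∀ t ∈ rest, PySem.Str.len t ≤ PySem.Str.len b) →
    rest.foldl pvUpd (some b) = some b := by
  intro rest
  induction rest with
  | nil => intro b _; rfl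
  | cons t r ih =>
    intro b hb
    simp only [List.foldl_cons]
    have h1 : pvUpd (some b) t = some b := by
      simp only [pvUpd]
      rw [if_neg (not_lt.mpr (hb t (List.mem_cons_self)))]
    rw [h1]
    exact ih b (fun x hx => hb x (List.mem_cons_of_mem _ hx))

-- if something in rest beats b, the running best ends at the first title of maximal length
theorem pv_G2 : ∀ (rest : List String) (b : String),
    PySem.Str.len b < pvMaxLen rest →
    rest.foldl pvUpd (some b) = rest.find? (fun t => decide (PySem.Str.len t = pvMaxLen rest)) := by
  intro rest
  induction rest with
  | nil =>
    intro b hb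
    exact absurd (lt_of_lt_of_le hb (le_refl _)) (not_lt.mpr (le_trans (pv_len_nonneg b) (le_of_eq rfl)))
  | cons t r ih =>
    intro b hb
    rw [pvMaxLen_cons] at hb
    simp only [List.foldl_cons]
    by_cases hlt : PySem.Str.len b < PySem.Str.len t
    · have h1 : pvUpd (some b) t = some t := by simp only [pvUpd]; rw [if_pos hlt]
      rw [h1]
      by_cases hM : pvMaxLen r ≤ PySem.Str.len t
      · have hmax : pvMaxLen (t :: r) = PySem.Str.len t := by
          rw [pvMaxLen_cons]; exact max_eq_left hM
        rw [hmax]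
        rw [List.find?_cons_of_pos (by simp only [decide_eq_true_eq])]
        exact pv_G1 r t (fun x hx => le_trans (pv_le_maxLen hx) hM)
      · push_neg at hM
        have hmax : pvMaxLen (t :: r) = pvMaxLen r := by
          rw [pvMaxLen_cons]; exact max_eq_right hM.le
        rw [hmax]
        rw [List.find?_cons_of_neg (by simp only [decide_eq_true_eq]; exact ne_of_lt hM)]
        exact ih t hM
    · push_neg at hlt
      have h1 : pvUpd (some b) t = some b := by simp only [pvUpd]; rw [if_neg (not_lt.mpr hlt)]
      rw [h1]
      have hbM : PySem.Str.len b < pvMaxLen r := by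
        rcases max_cases (PySem.Str.len t) (pvMaxLen r) with ⟨he, _⟩ | ⟨he, _⟩
        · rw [he] at hb; omega
        · rwa [he] at hb
      have hmax : pvMaxLen (t :: r) = pvMaxLen r := by
        rw [pvMaxLen_cons]; exact max_eq_right (le_trans hlt hbM.le)
      rw [hmax]
      rw [List.find?_cons_of_neg (by simp only [decide_eq_true_eq]; omega)]
      exact ih b hbM

-- PySem.List.max? is the fold of pvUpd
theorem pv_max?_eq_foldl (ts : List String) :
    PySem.List.max? ts PySem.Str.len = ts.foldl pvUpd none := by
  unfold PySem.List.max?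
  congr 1
  funext acc x
  cases acc <;> rfl

-- characterisation: for nonempty ts, max(ts, key=len) is the first element of maximal length
theorem pv_max?_char (t : String) (r : List String) :
    PySem.List.max? (t :: r) PySem.Str.len
      = (t :: r).find? (fun x => decide (PySem.Str.len x = pvMaxLen (t :: r))) := by
  rw [pv_max?_eq_foldl]
  simp only [List.foldl_cons]
  have h1 : pvUpd none t = some t := rfl
  rw [h1]
  by_cases hM : pvMaxLen r ≤ PySem.Str.len t
  · have hmax : pvMaxLen (t :: r) = PySem.Str.len t := by
      rw [pvMaxLen_cons]; exact max_eq_left hM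
    rw [hmax, List.find?_cons_of_pos (by simp only [decide_eq_true_eq])]
    exact pv_G1 r t (fun x hx => le_trans (pv_le_maxLen hx) hM)
  · push_neg at hM
    have hmax : pvMaxLen (t :: r) = pvMaxLen r := by
      rw [pvMaxLen_cons]; exact max_eq_right hM.le
    rw [hmax, List.find?_cons_of_neg (by simp only [decide_eq_true_eq]; exact ne_of_lt hM)]
    exact pv_G2 r t hM

-- A's accumulating loop builds exactly filterMap pvValid
theorem pv_titles_eq : ∀ (l : List (List (String × String))) (acc : List String),
    l.foldl (fun acc e =>
      let title := PySem.Str.strip (PySem.Dict.getD ⟨e⟩ "extracted_title" "")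
      if title ≠ "" ∧ 10 ≤ PySem.Str.len title then acc ++ [title] else acc) acc
    = acc ++ l.filterMap pvValid := by
  intro l
  induction l with
  | nil => intro acc; simp
  | cons e rest ih =>
    intro acc
    simp only [List.foldl_cons, List.filterMap_cons]
    by_cases h : PySem.Str.strip (PySem.Dict.getD ⟨e⟩ "extracted_title" "") ≠ "" ∧
        10 ≤ PySem.Str.len (PySem.Str.strip (PySem.Dict.getD ⟨e⟩ "extracted_title" ""))
    · have hv : pvValid e = some (PySem.Str.strip (PySem.Dict.getD ⟨e⟩ "extracted_title" "")) := by
        unfold pvValid; rw [if_pos h]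
      rw [hv]
      simp only [if_pos h]
      rw [ih]
      simp
    · have hv : pvValid e = none := by unfold pvValid; rw [if_neg h]
      rw [hv]
      simp only [if_neg h]
      exact ih acc

-- B's first loop computes pvMaxLen of the valid titles
theorem pv_m_eq : ∀ (l : List (List (String × String))) (a : Int),
    l.foldl (fun m e =>
      match pvValid e with
      | some t => if m < PySem.Str.len t then PySem.Str.len t else m
      | none => m) a
    = (l.filterMap pvValid).foldl pvStep a := by
  intro l
  induction l with
  | nil => intro a; rfl
  | cons e rest ih =>
    intro a
    simp only [List.foldl_cons, List.filterMap_cons]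
    cases hv : pvValid e with
    | some t => simp only [hv, List.foldl_cons]; exact ih _
    | none => simp only [hv]; exact ih a

-- B's second loop is find? over the valid titles
theorem pv_find_eq : ∀ (l : List (List (String × String))) (m : Int),
    pvFindLen l m = (l.filterMap pvValid).find? (fun t => decide (PySem.Str.len t = m)) := by
  intro l
  induction l with
  | nil => intro m; rfl
  | cons e rest ih =>
    intro m
    simp only [pvFindLen, List.filterMap_cons]
    cases hv : pvValid e with
    | some t =>
      simp only
      by_cases h : PySem.Str.len t = m
      · rw [if_pos h, List.find?_cons_of_pos (by simp only [decide_eq_true_eq]; exact h)]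
      · rw [if_neg h, List.find?_cons_of_neg (by simp only [decide_eq_true_eq]; exact h)]
        exact ih m
    | none => simp only [hv]; exact ih m

-- every valid title has length ≥ 10
theorem pv_mem_len {l : List (List (String × String))} {t : String}
    (h : t ∈ l.filterMap pvValid) : 10 ≤ PySem.Str.len t := by
  rcases List.mem_filterMap.mp h with ⟨e, _, he⟩
  dsimp only [pvValid] at he
  split_ifs at he with hc
  cases he; exact hc.2

-- ===== VERDICT (by name: the statement is the Claim_ definition above) =====
theorem extract_title_from_evidence_spec : Claim_equal_extract_title_from_evidence := by
  intro l _
  show extract_title_from_evidence l = extract_title_from_evidence_alt l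
  unfold extract_title_from_evidence extract_title_from_evidence_alt
  rw [pv_titles_eq l [], pv_m_eq l 0]
  dsimp only
  rw [pv_find_eq]
  simp only [List.nil_append]
  cases hts : l.filterMap pvValid with
  | nil => simp [pvMaxLen]
  | cons t r =>
    have hm : pvMaxLen (t :: r) ≠ 0 := by
      have h10 : 10 ≤ PySem.Str.len t := pv_mem_len (hts ▸ List.mem_cons_self)
      have := pvMaxLen_cons t r
      have := pvMaxLen_nonneg r
      rcases max_cases (PySem.Str.len t) (pvMaxLen r) with ⟨he, _⟩ | ⟨he, h2⟩ <;> omega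
    rw [if_neg (by simp), if_neg (by exact hm)]
    exact pv_max?_char t r
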